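-- pv_equiv track=rewrite | github.com/megagnom111/kursovaya3 | polinom1.py | fast_transform
-- ===== SOURCE A (Python) =====
-- def fast_transform(vector: list[int]) -> list[int]:
--     """
--     Реализация быстрого алгоритма построения вектора полинома Жегалкина
--     Args:
--         vector: бинарный вектор значений функции длины POLINOM_LEN
--     Result:
--         бинарный вектор полинома Жегалкина длины POLINOM_LEN
--     """
--     n = len(vector)
--     a = vector.copy()
--
--     step = 1
--     while step < n:
--         for i in range(0, n, step * 2):
--             for j in range(i, i + step, 1):
--                 a[j + step] ^= a[j]
--         step *= 2
--
--     return a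
-- ===== SOURCE B (Python) =====
-- def fast_transform(vector: list[int]) -> list[int]:
--     """Divide-and-conquer Mobius (Zhegalkin) transform; never mutates the input."""
--     n = len(vector)
--     if n <= 1:
--         return list(vector)
--     h = n // 2
--     low = fast_transform(vector[:h])
--     high = fast_transform(vector[h:])
--     high = [x ^ y for x, y in zip(high, low)]
--     return low + high
-- ===== Notes on version B (the rewrite author's own statement) =====
-- stated objective: alternative
-- what changed: Replaces A's iterative in-place butterfly over doubling strides (step = 1,2,4,...) by a recursive divide-and-conquer Mobius transform: transform each half recursively, then xor the low half into the high half.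
import Mathlib
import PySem

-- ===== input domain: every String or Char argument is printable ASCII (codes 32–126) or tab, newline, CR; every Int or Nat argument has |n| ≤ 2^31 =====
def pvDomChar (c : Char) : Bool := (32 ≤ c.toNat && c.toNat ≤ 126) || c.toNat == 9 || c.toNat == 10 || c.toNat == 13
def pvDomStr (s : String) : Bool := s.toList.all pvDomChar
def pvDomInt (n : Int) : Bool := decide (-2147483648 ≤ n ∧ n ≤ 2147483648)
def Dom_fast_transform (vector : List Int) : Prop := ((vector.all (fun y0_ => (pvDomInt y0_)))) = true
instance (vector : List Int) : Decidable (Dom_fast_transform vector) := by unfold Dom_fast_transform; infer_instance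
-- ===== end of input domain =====

-- B replaces A's iterative in-place butterfly (step = 1,2,4,…) by a recursive divide-and-conquer
-- Möbius transform (transform halves, xor the low half into the high half); objective: alternative
-- decomposition, same asymptotic cost; neither implementation mutates its argument.

-- ===== PORT A =====
-- a[j + step] ^= a[j]  (indices are in range for every input admitted by Pre_; pyGetD/pySetD are
-- exact for in-range indices, and Pre_ excludes exactly the inputs on which Python raises IndexError)
def ftStep (s : Int) (a : List Int) (j : Int) : List Int :=
  PySem.List.pySetD a (j + s) (Int.xor (PySem.List.pyGetD a (j + s) 0) (PySem.List.pyGetD a j 0))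

-- for j in range(i, i + step, 1): …
def ftInner (s : Int) (a : List Int) (i : Int) : List Int :=
  (PySem.List.pyRange i (i + s) 1).foldl (ftStep s) a

-- for i in range(0, n, step * 2): …
def ftPass (n s : Int) (a : List Int) : List Int :=
  (PySem.List.pyRange 0 n (s * 2)).foldl (ftInner s) a

-- while step < n: …; step *= 2   (the '1 ≤ step' conjunct is a pure termination guard: along A's
-- execution step starts at 1 and only doubles, so the guard is always true when 'step < n' is)
def ftLoop (n step : Int) (a : List Int) : List Int :=
  if _h : 1 ≤ step ∧ step < n then ftLoop n (step * 2) (ftPass n step a) else a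
termination_by (n - step).toNat
decreasing_by omega

def fast_transform (vector : List Int) : List Int :=
  ftLoop (vector.length : Int) 1 vector

-- ===== PORT B =====
-- vector[:h] / vector[h:] with 0 ≤ h ≤ len are exactly take/drop; list(vector) copy is the identity here
def ftRec (v : List Int) : List Int :=
  if v.length ≤ 1 then v
  else
    let half := v.length / 2
    let low := ftRec (v.take half)
    let high := ftRec (v.drop half)
    low ++ List.zipWith (fun x y => Int.xor x y) high low
termination_by v.length
decreasing_by
  · simp; omega
  · simp; omega

def fast_transform_alt (vector : List Int) : List Int :=
  ftRec vector

-- ===== PRECONDITION & SPEC =====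
-- Pre_ excludes exactly the inputs on which A raises IndexError: every vector whose length is
-- neither 0 nor a power of two (A's inner loop then reads past the end of the list).
def Pre_fast_transform (vector : List Int) : Prop :=
  vector.length = 0 ∨ ∃ k < vector.length + 1, vector.length = 2 ^ k
instance (vector : List Int) : Decidable (Pre_fast_transform vector) := by
  unfold Pre_fast_transform; infer_instance

def pvWitness_fast_transform : List Int := [1, 0, 1, 1]

def Spec_fast_transform (vector : List Int) (out : List Int) : Prop := out = fast_transform_alt vector
instance (vector : List Int) (out : List Int) : Decidable (Spec_fast_transform vector out) := by
  unfold Spec_fast_transform; infer_instance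

-- ===== CLAIM (what is proved, stated in full; the proofs are below) =====
def Claim_equal_fast_transform : Prop := ∀ (vector : List Int), Dom_fast_transform vector → Pre_fast_transform vector → Spec_fast_transform vector (fast_transform vector)

-- ===== LEMMAS AND PROOFS =====

lemma length_foldl_pres {β : Type} {f : List Int → β → List Int}
    (hf : ∀ a j, (f a j).length = a.length) :
    ∀ (js : List β) (a : List Int), (js.foldl f a).length = a.length := by
  intro js
  induction js with
  | nil => intro a; rfl
  | cons j js ih => intro a; simp [List.foldl, ih, hf]

lemma length_ftStep (s : Int) (a : List Int) (j : Int) : (ftStep s a j).length = a.length := by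
  simp [ftStep, PySem.List.length_pySetD]

lemma length_ftInner (s : Int) (a : List Int) (i : Int) : (ftInner s a i).length = a.length :=
  length_foldl_pres (length_ftStep s) _ a

lemma length_ftPass (n s : Int) (a : List Int) : (ftPass n s a).length = a.length :=
  length_foldl_pres (length_ftInner s) _ a

lemma ftStep_append_left (x y : List Int) (s j : Int)
    (h0 : 0 ≤ j) (hs : 0 ≤ s) (h1 : j + s < (x.length : Int)) :
    ftStep s (x ++ y) j = ftStep s x j ++ y := by
  have h2 : (j + s).toNat < x.length := by omega
  have h3 : j.toNat < x.length := by omega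
  unfold ftStep
  rw [PySem.List.pySetD_of_nonneg (i := j + s) _ _ (by omega),
      PySem.List.pySetD_of_nonneg (i := j + s) _ _ (by omega),
      PySem.List.pyGetD_eq_getElem (i := j + s) (x ++ y) 0 (by omega) (by simp only [List.length_append]; push_cast; omega),
      PySem.List.pyGetD_eq_getElem (i := j) (x ++ y) 0 (by omega) (by simp only [List.length_append]; push_cast; omega),
      PySem.List.pyGetD_eq_getElem (i := j + s) x 0 (by omega) (by omega),
      PySem.List.pyGetD_eq_getElem (i := j) x 0 (by omega) (by omega),
      List.getElem_append_left h2, List.getElem_append_left h3,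
      List.set_append, if_pos h2]

lemma ftStep_append_right (x y : List Int) (s j : Int)
    (hs : 0 ≤ s) (hj : (x.length : Int) ≤ j) (hjy : j + s - x.length < (y.length : Int)) :
    ftStep s (x ++ y) j = x ++ ftStep s y (j - x.length) := by
  have h2 : x.length ≤ (j + s).toNat := by omega
  have h3 : x.length ≤ j.toNat := by omega
  have h4 : (j + s).toNat - x.length < y.length := by omega
  have h5 : j.toNat - x.length < y.length := by omega
  unfold ftStep
  rw [PySem.List.pySetD_of_nonneg (i := j + s) _ _ (by omega),
      PySem.List.pySetD_of_nonneg (i := j - (x.length : Int) + s) _ _ (by omega),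
      PySem.List.pyGetD_eq_getElem (i := j + s) (x ++ y) 0 (by omega) (by simp only [List.length_append]; push_cast; omega),
      PySem.List.pyGetD_eq_getElem (i := j) (x ++ y) 0 (by omega) (by simp only [List.length_append]; push_cast; omega),
      PySem.List.pyGetD_eq_getElem (i := j - (x.length : Int) + s) y 0 (by omega) (by omega),
      PySem.List.pyGetD_eq_getElem (i := j - (x.length : Int)) y 0 (by omega) (by omega),
      List.getElem_append_right h2, List.getElem_append_right h3,
      List.set_append, if_neg (by omega)]
  simp only [show j.toNat - x.length = (j - (x.length : Int)).toNat from by omega,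
             show (j + s).toNat = (j - (x.length : Int) + s).toNat + x.length from by omega,
             Nat.add_sub_cancel]

lemma foldl_ftStep_left (s : Int) (y : List Int) (hs : 0 ≤ s) :
    ∀ (js : List Int) (x : List Int), (∀ j ∈ js, 0 ≤ j ∧ j + s < (x.length : Int)) →
      js.foldl (ftStep s) (x ++ y) = js.foldl (ftStep s) x ++ y := by
  intro js
  induction js with
  | nil => intro x _; rfl
  | cons j js ih =>
    intro x h
    have hj := h j (List.mem_cons_self ..)
    simp only [List.foldl_cons]
    rw [ftStep_append_left x y s j hj.1 hs hj.2]
    exact ih (ftStep s x j) (fun j' hj' => by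
      simpa [length_ftStep] using h j' (List.mem_cons_of_mem _ hj'))

lemma foldl_ftStep_right (s : Int) (x : List Int) (hs : 0 ≤ s) :
    ∀ (js : List Int) (y : List Int),
      (∀ j ∈ js, (x.length : Int) ≤ j ∧ j + s - x.length < (y.length : Int)) →
      js.foldl (ftStep s) (x ++ y) =
        x ++ (js.map (fun j => j - (x.length : Int))).foldl (ftStep s) y := by
  intro js
  induction js with
  | nil => intro y _; rfl
  | cons j js ih =>
    intro y h
    have hj := h j (List.mem_cons_self ..)
    simp only [List.foldl_cons, List.map_cons]
    rw [ftStep_append_right x y s j hs hj.1 hj.2]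
    exact ih (ftStep s y (j - x.length)) (fun j' hj' => by
      simpa [length_ftStep] using h j' (List.mem_cons_of_mem _ hj'))

lemma ftInner_append_left (x y : List Int) (s i : Int)
    (h0 : 0 ≤ i) (hs : 0 ≤ s) (h1 : i + s + s ≤ (x.length : Int)) :
    ftInner s (x ++ y) i = ftInner s x i ++ y := by
  unfold ftInner
  refine foldl_ftStep_left s y hs _ x (fun j hj => ?_)
  rw [PySem.List.mem_pyRange_one] at hj
  exact ⟨by omega, by omega⟩

lemma map_sub_pyRange (a b L : Int) :
    (PySem.List.pyRange a b 1).map (fun j => j - L) = PySem.List.pyRange (a - L) (b - L) 1 := by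
  rw [PySem.List.pyRange_one, PySem.List.pyRange_one, List.map_map,
      show b - L - (a - L) = b - a from by ring]
  exact List.map_congr_left (fun k _ => by simp; omega)

lemma ftInner_append_right (x y : List Int) (s i : Int)
    (hs : 0 ≤ s) (hi : (x.length : Int) ≤ i) (h1 : i + s + s - x.length ≤ (y.length : Int)) :
    ftInner s (x ++ y) i = x ++ ftInner s y (i - x.length) := by
  unfold ftInner
  rw [foldl_ftStep_right s x hs _ y (fun j hj => by
        rw [PySem.List.mem_pyRange_one] at hj
        exact ⟨by omega, by omega⟩),
      map_sub_pyRange, show i + s - (x.length : Int) = i - x.length + s from by ring]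

lemma pyRange_mul (a s : Int) (hs : 0 < s) (c : Nat) :
    PySem.List.pyRange a (a + s * c) s = (List.range c).map (fun k : Nat => a + s * (k : Int)) := by
  rcases Nat.eq_zero_or_pos c with hc | hc
  · subst hc
    simp [PySem.List.pyRange_of_pos a _ hs]
  · have hcpos : (0 : Int) < (c : Int) := by exact_mod_cast hc
    have hlt : a < a + s * c := by nlinarith
    rw [PySem.List.pyRange_of_pos _ _ hs, if_pos hlt,
        show a + s * (c : Int) - a + s - 1 = (s - 1) + (c : Int) * s from by ring,
        Int.add_mul_ediv_right _ _ (by omega : s ≠ 0),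
        Int.ediv_eq_zero_of_lt (by omega) (by omega)]
    rw [zero_add, Int.toNat_natCast]

lemma foldl_ftInner_left (s : Int) (y : List Int) (hs : 0 ≤ s) :
    ∀ (is : List Int) (x : List Int), (∀ i ∈ is, 0 ≤ i ∧ i + s + s ≤ (x.length : Int)) →
      is.foldl (ftInner s) (x ++ y) = is.foldl (ftInner s) x ++ y := by
  intro is
  induction is with
  | nil => intro x _; rfl
  | cons i is ih =>
    intro x h
    have hi := h i (List.mem_cons_self ..)
    simp only [List.foldl_cons]
    rw [ftInner_append_left x y s i hi.1 hs hi.2]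
    exact ih (ftInner s x i) (fun i' hi' => by
      simpa [length_ftInner] using h i' (List.mem_cons_of_mem _ hi'))

lemma foldl_ftInner_right (s : Int) (x : List Int) (hs : 0 ≤ s) :
    ∀ (is : List Int) (y : List Int),
      (∀ i ∈ is, (x.length : Int) ≤ i ∧ i + s + s - x.length ≤ (y.length : Int)) →
      is.foldl (ftInner s) (x ++ y) =
        x ++ (is.map (fun i => i - (x.length : Int))).foldl (ftInner s) y := by
  intro is
  induction is with
  | nil => intro y _; rfl
  | cons i is ih =>
    intro y h
    have hi := h i (List.mem_cons_self ..)
    simp only [List.foldl_cons, List.map_cons]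
    rw [ftInner_append_right x y s i hs hi.1 hi.2]
    exact ih (ftInner s y (i - x.length)) (fun i' hi' => by
      simpa [length_ftInner] using h i' (List.mem_cons_of_mem _ hi'))

lemma ftPass_append (x y : List Int) (s : Int) (c : Nat)
    (hs : 0 < s) (hx : (x.length : Int) = s * 2 * c) (hy : y.length = x.length) :
    ftPass (2 * (x.length : Int)) s (x ++ y) =
      ftPass (x.length : Int) s x ++ ftPass (x.length : Int) s y := by
  unfold ftPass
  have e1 : (2 * (x.length : Int)) = 0 + (s * 2) * ((2 * c : Nat) : Int) := by
    push_cast [hx]; ring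
  have e2 : ((x.length : Int)) = 0 + (s * 2) * ((c : Nat) : Int) := by
    push_cast [hx]; ring
  rw [e1, pyRange_mul 0 (s * 2) (by omega) (2 * c), e2, pyRange_mul 0 (s * 2) (by omega) c,
      two_mul c, List.range_add, List.map_append, List.foldl_append, List.map_map]
  have hb1 : ∀ i ∈ (List.range c).map (fun k : Nat => 0 + (s * 2) * (k : Int)),
      0 ≤ i ∧ i + s + s ≤ (x.length : Int) := by
    intro i hi
    simp only [List.mem_map, List.mem_range] at hi
    obtain ⟨k, hk, rfl⟩ := hi
    have hk0 : (0 : Int) ≤ (k : Int) := by omega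
    have hk' : (k : Int) + 1 ≤ (c : Int) := by exact_mod_cast hk
    constructor
    · nlinarith
    · rw [hx]; nlinarith
  rw [foldl_ftInner_left s y (by omega) _ x hb1]
  have hlX : (((List.range c).map (fun k : Nat => 0 + (s * 2) * (k : Int))).foldl
      (ftInner s) x).length = x.length := length_foldl_pres (length_ftInner s) _ x
  have hb2 : ∀ i ∈ (List.range c).map
      ((fun k : Nat => 0 + (s * 2) * (k : Int)) ∘ (fun k => c + k)),
      ((((List.range c).map (fun k : Nat => 0 + (s * 2) * (k : Int))).foldl
          (ftInner s) x).length : Int) ≤ i ∧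
        i + s + s - (((List.range c).map (fun k : Nat => 0 + (s * 2) * (k : Int))).foldl
          (ftInner s) x).length ≤ (y.length : Int) := by
    intro i hi
    simp only [List.mem_map, List.mem_range, Function.comp] at hi
    obtain ⟨k, hk, rfl⟩ := hi
    rw [hlX]
    have hk' : (k : Int) + 1 ≤ (c : Int) := by exact_mod_cast hk
    have hk0 : (0 : Int) ≤ (k : Int) := by omega
    constructor
    · rw [hx]; push_cast; nlinarith
    · rw [hy, hx]; push_cast; nlinarith
  rw [foldl_ftInner_right s _ (by omega) _ y hb2, List.map_map]
  congr 1
  congr 1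
  refine List.map_congr_left (fun k hk => ?_)
  simp only [Function.comp]
  rw [hlX, hx]
  push_cast
  ring

lemma ftStep_at (P : List Int) (b : Int) (y' : List Int) (j s : Int)
    (hj : 0 ≤ j) (hjP : j.toNat < P.length) (hsum : j + s = (P.length : Int)) :
    ftStep s (P ++ b :: y') j = P ++ Int.xor b (P[j.toNat]'hjP) :: y' := by
  unfold ftStep
  rw [PySem.List.pySetD_of_nonneg (i := j + s) _ _ (by omega),
      PySem.List.pyGetD_eq_getElem (i := j + s) (P ++ b :: y') 0 (by omega)
        (by simp only [List.length_append, List.length_cons]; push_cast; omega),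
      PySem.List.pyGetD_eq_getElem (i := j) (P ++ b :: y') 0 (by omega)
        (by simp only [List.length_append, List.length_cons]; push_cast; omega),
      List.getElem_append_right (by omega : P.length ≤ (j + s).toNat),
      List.getElem_append_left hjP,
      List.set_append, if_neg (by omega)]
  simp only [show (j + s).toNat - P.length = 0 from by omega]
  simp

lemma inner_final :
    ∀ (x y u w : List Int), y.length = x.length → w.length = u.length →
      (PySem.List.pyRange (u.length : Int) ((u.length : Int) + x.length) 1).foldl
          (ftStep ((u.length : Int) + x.length)) (u ++ x ++ w ++ y) =
        u ++ x ++ w ++ List.zipWith (fun a b => Int.xor a b) y x := by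
  intro x
  induction x with
  | nil =>
    intro y u w hy hw
    have hynil : y = [] := List.eq_nil_of_length_eq_zero (by simpa using hy)
    subst hynil
    simp only [List.length_nil, Nat.cast_zero, add_zero]
    rw [PySem.List.pyRange_one_eq_nil le_rfl]
    simp
  | cons a x' ih =>
    intro y u w hy hw
    cases y with
    | nil => simp at hy
    | cons b y' =>
      have hy' : y'.length = x'.length := by simpa using hy
      rw [PySem.List.pyRange_one_cons (by simp only [List.length_cons]; push_cast; omega),
          List.foldl_cons]
      have hjP : ((u.length : Int)).toNat < ((u ++ a :: x') ++ w).length := by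
        simp only [List.length_append, List.length_cons]; omega
      rw [ftStep_at ((u ++ a :: x') ++ w) b y' (u.length : Int)
            ((u.length : Int) + ((a :: x').length : Int)) (by omega) hjP
            (by simp only [List.length_append, List.length_cons]; push_cast; omega)]
      have hPa : ((u ++ a :: x') ++ w)[((u.length : Int)).toNat]'hjP = a := by
        rw [List.getElem_append_left (by simp only [List.length_append, List.length_cons]; omega)]
        rw [List.getElem_append_right (by omega)]
        simp
      rw [hPa]
      have htail := ih y' (u ++ [a]) (w ++ [Int.xor b a]) hy' (by simp [hw])
      simp only [List.length_append, List.length_cons, List.length_nil] at htail ⊢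
      push_cast at htail ⊢
      rw [show (u.length : Int) + 1 + (x'.length : Int) = (u.length : Int) + ((x'.length : Int) + 1)
            from by ring] at htail
      simpa [List.append_assoc] using htail

lemma ftPass_final (x y : List Int) (hy : y.length = x.length) (hx : 0 < x.length) :
    ftPass (2 * (x.length : Int)) (x.length : Int) (x ++ y) =
      x ++ List.zipWith (fun a b => Int.xor a b) y x := by
  unfold ftPass
  rw [show (2 * (x.length : Int)) = 0 + ((x.length : Int) * 2) * ((1 : Nat) : Int) from by
        push_cast; ring,
      pyRange_mul 0 ((x.length : Int) * 2) (by omega) 1]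
  simp only [List.range_one, List.map_cons, List.map_nil, Nat.cast_zero, mul_zero, add_zero,
    List.foldl_cons, List.foldl_nil]
  unfold ftInner
  simpa using inner_final x y [] [] hy rfl

lemma ftLoop_split :
    ∀ (d t k : Nat) (x y : List Int), t + d = k → x.length = 2 ^ k → y.length = x.length →
      ftLoop (2 * (x.length : Int)) (2 ^ t) (x ++ y) =
        ftLoop (x.length : Int) (2 ^ t) x ++
          List.zipWith (fun a b => Int.xor a b) (ftLoop (x.length : Int) (2 ^ t) y)
            (ftLoop (x.length : Int) (2 ^ t) x) := by
  intro d
  induction d with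
  | zero =>
    intro t k x y htk hx hy
    have hk : t = k := by omega
    subst hk
    have hm : ((x.length : Nat) : Int) = (2 : Int) ^ t := by rw [hx]; push_cast; ring
    have h1t : (1 : Int) ≤ 2 ^ t := one_le_pow₀ (by norm_num)
    rw [ftLoop, dif_pos ⟨h1t, by omega⟩, ftLoop, dif_neg (by omega), ← hm,
        ftPass_final x y hy (by rw [hx]; exact Nat.two_pow_pos t)]
    have hid : ∀ z : List Int, ftLoop (x.length : Int) ((x.length : Nat) : Int) z = z := by
      intro z; rw [ftLoop, dif_neg (by omega)]
    rw [hid x, hid y]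
  | succ d ihd =>
    intro t k x y htk hx hy
    have htlt : t < k := by omega
    have hm : ((x.length : Nat) : Int) = (2 : Int) ^ k := by rw [hx]; push_cast; ring
    have h1t : (1 : Int) ≤ 2 ^ t := one_le_pow₀ (by norm_num)
    have httk : (2 : Int) ^ t < 2 ^ k := pow_lt_pow_right₀ (by norm_num) htlt
    have hxc : ((x.length : Nat) : Int) = (2 : Int) ^ t * 2 * ((2 ^ (k - t - 1) : Nat) : Int) := by
      rw [hm]
      push_cast
      calc (2 : Int) ^ k = 2 ^ ((t + 1) + (k - t - 1)) := by congr 1; omega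
        _ = 2 ^ (t + 1) * 2 ^ (k - t - 1) := pow_add 2 _ _
        _ = 2 ^ t * 2 * 2 ^ (k - t - 1) := by rw [pow_succ]
    rw [ftLoop, dif_pos ⟨h1t, by omega⟩,
        ftPass_append x y (2 ^ t) (2 ^ (k - t - 1)) (by positivity) hxc hy]
    have hlp : (ftPass ((x.length : Nat) : Int) (2 ^ t) x).length = x.length :=
      length_ftPass _ _ _
    have hlp2 : (ftPass ((x.length : Nat) : Int) (2 ^ t) y).length =
        (ftPass ((x.length : Nat) : Int) (2 ^ t) x).length := by
      rw [hlp, length_ftPass, hy]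
    have hx2 : (ftPass ((x.length : Nat) : Int) (2 ^ t) x).length = 2 ^ k := by rw [hlp, hx]
    have key := ihd (t + 1) k (ftPass ((x.length : Nat) : Int) (2 ^ t) x)
      (ftPass ((x.length : Nat) : Int) (2 ^ t) y) (by omega) hx2 hlp2
    rw [hlp] at key
    rw [show (2 : Int) ^ t * 2 = 2 ^ (t + 1) from (pow_succ 2 t).symm, key]
    have hstep : ∀ z : List Int, ftLoop ((x.length : Nat) : Int) (2 ^ t) z =
        ftLoop ((x.length : Nat) : Int) (2 ^ (t + 1)) (ftPass ((x.length : Nat) : Int) (2 ^ t) z) := by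
      intro z
      rw [ftLoop, dif_pos ⟨h1t, by omega⟩, pow_succ]
    rw [hstep x, hstep y]

lemma ft_pow : ∀ (k : Nat) (v : List Int), v.length = 2 ^ k → fast_transform v = ftRec v := by
  intro k
  induction k with
  | zero =>
    intro v hv
    simp only [pow_zero] at hv
    unfold fast_transform
    rw [ftLoop, dif_neg (by omega), ftRec, if_pos (by omega)]
  | succ k ihk =>
    intro v hv
    have hpow : 2 ^ (k + 1) = 2 * 2 ^ k := by rw [pow_succ]; ring
    have htake : (v.take (2 ^ k)).length = 2 ^ k := by simp [List.length_take]; omega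
    have hdrop : (v.drop (2 ^ k)).length = 2 ^ k := by simp [List.length_drop]; omega
    have hyl : (v.drop (2 ^ k)).length = (v.take (2 ^ k)).length := by rw [htake, hdrop]
    have hsplit : v.take (2 ^ k) ++ v.drop (2 ^ k) = v := List.take_append_drop _ _
    have key := ftLoop_split k 0 k (v.take (2 ^ k)) (v.drop (2 ^ k)) (by omega) htake hyl
    simp only [pow_zero] at key
    have hlhs : fast_transform v =
        ftLoop (2 * ((v.take (2 ^ k)).length : Int)) 1 (v.take (2 ^ k) ++ v.drop (2 ^ k)) := by
      unfold fast_transform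
      conv_lhs => rw [← hsplit]
      rw [show (((v.take (2 ^ k) ++ v.drop (2 ^ k)).length : Nat) : Int) =
            2 * (((v.take (2 ^ k)).length : Nat) : Int) from by
          rw [List.length_append, htake, hdrop]; push_cast; ring]
    rw [hlhs, key]
    have hxf : ftLoop (((v.take (2 ^ k)).length : Nat) : Int) 1 (v.take (2 ^ k)) =
        ftRec (v.take (2 ^ k)) := ihk _ htake
    have hyf : ftLoop (((v.take (2 ^ k)).length : Nat) : Int) 1 (v.drop (2 ^ k)) =
        ftRec (v.drop (2 ^ k)) := by
      have h := ihk _ hdrop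
      unfold fast_transform at h
      rw [show (((v.drop (2 ^ k)).length : Nat) : Int) = (((v.take (2 ^ k)).length : Nat) : Int)
            from by rw [htake, hdrop]] at h
      exact h
    have hposk : 0 < 2 ^ k := Nat.two_pow_pos k
    have hhalf : v.length / 2 = 2 ^ k := by omega
    have hrec : ftRec v = ftRec (v.take (2 ^ k)) ++
        List.zipWith (fun x y => Int.xor x y) (ftRec (v.drop (2 ^ k))) (ftRec (v.take (2 ^ k))) := by
      rw [ftRec, if_neg (by omega)]
      simp only [hhalf]
    rw [hxf, hyf, hrec]

-- ===== VERDICT (by name: the statement is the Claim_ definition above) =====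
theorem fast_transform_spec : Claim_equal_fast_transform := by
  intro v _ hpre
  unfold Spec_fast_transform fast_transform_alt
  rcases hpre with h0 | ⟨k, _, hk⟩
  · have hv : v = [] := List.eq_nil_of_length_eq_zero h0
    subst hv
    simp [fast_transform, ftLoop, ftRec]
  · exact ft_pow k v hk
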